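-- pv_equiv track=rewrite | github.com/XungangYin/PointCloud | pcd/data/qhull/trans-alpha-faces-multi.py | input_out
-- ===== SOURCE A (Python) =====
-- def input_out(out):
--     alpha_face_lists = []
--     faces = []
--     flag = 0
--     i=0
--     for line in out:
--         i += 1
--         if (line == "+++++\n"):
--             flag += 1
--             if (flag % 2) == 1:
--                 faces = []
--             else:
--                 if (len(faces)):
--                     alpha_face_lists.append(faces)   #由于采用较大规模点云，这里可以认为 faces 中一定有元素
--         else:
--             oblist = line.split()
--             face = [int(x) for x in oblist]
--             faces.append(face)
--
--     return alpha_face_lists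
-- ===== SOURCE B (Python) =====
-- def input_out(out):
--     # Split the line stream into segments at each "+++++\n" delimiter,
--     # parsing every non-delimiter line into a face as we go; a trailing
--     # unclosed segment never reaches `segs`.
--     segs = []
--     cur = []
--     for line in out:
--         if line == "+++++\n":
--             segs.append(cur)
--             cur = []
--         else:
--             cur.append([int(x) for x in line.split()])
--     # Faces sit between delimiter pairs: keep the non-empty odd-indexed segments.
--     return [seg for i, seg in enumerate(segs) if i % 2 == 1 and seg]
-- ===== Notes on version B (the rewrite author's own statement) =====
-- stated objective: alternative
-- what changed: A's single-pass parity-toggle state machine (flag counter, reset on odd delimiter, commit on even delimiter, with later lines leaking into the committed list through aliasing) is replaced by a two-phase pass: split the lines into parsed segments at each '+++++' delimiter line, then keep the non-empty odd-indexed segments; Pre_ excludes inputs where a non-delimiter line holds a token that is not a valid int literal (both programs raise ValueError there).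
-- intended difference: On inputs with a data line after a closing delimiter whose just-committed segment was non-empty, A's Python list aliasing leaks those later faces into the already-committed list, while B returns only the faces between the delimiter pair, which is the intended content of a committed segment. — e.g. on input_out(["+++++\n", "1\n", "+++++\n", "2\n"]): A returns [[[1], [2]]], B returns [[[1]]]
import Mathlib
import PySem

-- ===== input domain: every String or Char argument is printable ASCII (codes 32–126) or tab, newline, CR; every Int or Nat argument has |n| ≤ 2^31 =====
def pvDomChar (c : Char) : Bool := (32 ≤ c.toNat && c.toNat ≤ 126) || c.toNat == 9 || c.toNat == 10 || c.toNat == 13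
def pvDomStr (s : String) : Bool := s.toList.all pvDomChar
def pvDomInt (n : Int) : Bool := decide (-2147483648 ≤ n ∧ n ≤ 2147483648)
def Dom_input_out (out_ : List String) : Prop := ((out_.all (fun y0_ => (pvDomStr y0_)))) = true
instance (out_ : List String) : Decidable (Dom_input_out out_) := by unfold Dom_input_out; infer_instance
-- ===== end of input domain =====

-- B replaces A's parity-toggle state machine by a split-at-delimiter then select-odd-segments
-- pass (objective: alternative decomposition, similar cost). Return-value equivalence outside
-- D_; neither program mutates its argument. Python A appends the *object* `faces` into the
-- result and keeps appending to it afterwards (list aliasing); port A models that aliasing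
-- explicitly with an `aliased` flag.

-- ===== PORT A =====
-- `[int(x) for x in line.split()]`; under Pre_ every token parses, so `.getD 0` is never taken.
def pvParseFace (line : String) : List Int :=
  (PySem.Str.split₀ line).map (fun x => (PySem.Int.ofStr? x).getD 0)

structure PvAState where
  alpha : List (List (List Int))
  faces : List (List Int)
  flag : Int
  aliased : Bool          -- Python aliasing: `faces` IS the last element of `alpha`
  deriving Repr, DecidableEq

def pvAStep (s : PvAState) (line : String) : PvAState :=
  if line = "+++++\n" then
    let flag := s.flag + 1
    if flag % 2 = 1 then
      { s with faces := [], flag := flag, aliased := false }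
    else
      if s.faces ≠ [] then
        { s with alpha := s.alpha ++ [s.faces], flag := flag, aliased := true }
      else
        { s with flag := flag }
  else
    let faces := s.faces ++ [pvParseFace line]
    -- an append to `faces` is visible through `alpha`'s last element when aliased
    { s with faces := faces,
             alpha := if s.aliased then s.alpha.dropLast ++ [faces] else s.alpha }

-- (the Python loop counter `i` is dead code and is not ported)
def input_out (out_ : List String) : List (List (List Int)) :=
  (out_.foldl pvAStep { alpha := [], faces := [], flag := 0, aliased := false }).alpha

-- ===== PORT B =====
-- the loop of Source B: accumulate (segs, cur), closing a segment at each delimiter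
def pvSegStep (s : List (List (List Int)) × List (List Int)) (line : String) :
    List (List (List Int)) × List (List Int) :=
  if line = "+++++\n" then (s.1 ++ [s.2], [])
  else (s.1, s.2 ++ [pvParseFace line])

-- `[seg for i, seg in enumerate(segs) if i % 2 == 1 and seg]`
def pvOddSel : Nat → List (List (List Int)) → List (List (List Int))
  | _, [] => []
  | i, s :: t => (if i % 2 = 1 ∧ s ≠ [] then [s] else []) ++ pvOddSel (i + 1) t

def input_out_alt (out_ : List String) : List (List (List Int)) :=
  let st := out_.foldl pvSegStep ([], [])
  pvOddSel 0 st.1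

-- ===== PRECONDITION & SPEC =====
-- Pre_ excludes exactly the inputs on which Python A raises ValueError: some non-delimiter line
-- holding a whitespace-separated token that is not a valid int literal (B raises there too).
def Pre_input_out (out_ : List String) : Prop :=
  ∀ line ∈ out_, line ≠ "+++++\n" →
    ∀ tok ∈ PySem.Str.split₀ line,
      (PySem.Int.ofStr? tok).isSome
instance (out_ : List String) : Decidable (Pre_input_out out_) := by
  unfold Pre_input_out; infer_instance

def pvWitness_input_out : List String := ["+++++\n", "1 2\n", "", "+++++\n", "3\n"]

-- On inputs with a data line after a closing "+++++\n" whose just-committed segment was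
-- non-empty, A (through Python list aliasing) lets those later faces leak into the
-- already-committed list; B returns only the faces between the delimiter pair, which is the
-- intended content of a committed segment.
def D_input_out (out_ : List String) : Prop :=
  ∃ k < (out_.splitOn "+++++\n").length,
    ((out_.splitOn "+++++\n").getD (2 * k + 1) []) ≠ [] ∧
    ((out_.splitOn "+++++\n").getD (2 * k + 2) []) ≠ []
instance (out_ : List String) : Decidable (D_input_out out_) := by
  unfold D_input_out; infer_instance

def Spec_input_out (out_ : List String) (out : List (List (List Int))) : Prop := ¬ D_input_out out_ → out = input_out_alt out_
instance (out_ : List String) (out : List (List (List Int))) : Decidable (Spec_input_out out_ out) := by unfold Spec_input_out; infer_instance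

def pvDiffWitness_input_out : List String := ["+++++\n", "1\n", "+++++\n", "2\n"]
def pvDiffWitnessOut_input_out : (List (List (List Int))) × (List (List (List Int))) :=
  ([[[1], [2]]], [[[1]]])

-- ===== CLAIM (what is proved, stated in full; the proofs are below) =====
def Claim_unchanged_input_out : Prop := ∀ (out_ : List String), Dom_input_out out_ → Pre_input_out out_ → Spec_input_out out_ (input_out out_)
def Claim_changed_input_out : Prop := Dom_input_out (pvDiffWitness_input_out) ∧ Pre_input_out (pvDiffWitness_input_out) ∧ D_input_out (pvDiffWitness_input_out) ∧ input_out (pvDiffWitness_input_out) = pvDiffWitnessOut_input_out.1 ∧ input_out_alt (pvDiffWitness_input_out) = pvDiffWitnessOut_input_out.2 ∧ pvDiffWitnessOut_input_out.1 ≠ pvDiffWitnessOut_input_out.2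
def Claim_exact_input_out : Prop := ∀ (out_ : List String), Dom_input_out out_ → Pre_input_out out_ → D_input_out out_ → input_out out_ ≠ input_out_alt out_

-- ===== LEMMAS AND PROOFS =====

-- pvChunkPairs: pair up segments two at a time, keep a (plus its aliased continuation b)
-- when a is non-empty; this is the shape A's state machine computes.
def pvChunkPairs : List (List (List Int)) → List (List (List Int))
  | a :: b :: t => (if a ≠ [] then [a ++ b] else []) ++ pvChunkPairs t
  | _ => []

@[simp] theorem pvChunkPairs_nil : pvChunkPairs [] = [] := rfl
@[simp] theorem pvChunkPairs_singleton (a : List (List Int)) : pvChunkPairs [a] = [] := rfl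
@[simp] theorem pvChunkPairs_cons_cons (a b : List (List Int)) (t : List (List (List Int))) :
    pvChunkPairs (a :: b :: t) = (if a ≠ [] then [a ++ b] else []) ++ pvChunkPairs t := rfl

theorem pvChunkPairs_concat_even (t : List (List (List Int))) (x : List (List Int))
    (h : t.length % 2 = 0) : pvChunkPairs (t ++ [x]) = pvChunkPairs t := by
  induction t using pvChunkPairs.induct with
  | case1 a b t ih =>
    have ht : t.length % 2 = 0 := by simp at h; omega
    simp [ih ht]
  | case2 t h2 =>
    match t, h2 with
    | [], _ => rfl
    | [a], h2 => simp at h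
    | a :: b :: t, h2 => exact absurd rfl (h2 a b t)

theorem pvChunkPairs_concat_odd (t : List (List (List Int))) (x : List (List Int))
    (h : t.length % 2 = 1) :
    pvChunkPairs (t ++ [x]) = pvChunkPairs t.dropLast ++
      (if t.getLast?.getD [] ≠ [] then [t.getLast?.getD [] ++ x] else []) := by
  induction t using pvChunkPairs.induct with
  | case1 a b t ih =>
    have ht : t.length % 2 = 1 := by simp at h; omega
    rcases eq_or_ne t [] with rfl | hne
    · simp at ht
    · have h1 : (a :: b :: t).getLast? = t.getLast? := by
        rw [List.getLast?_cons_cons]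
        cases t with
        | nil => exact absurd rfl hne
        | cons c u => rw [List.getLast?_cons_cons]
      have h2 : (a :: b :: t).dropLast = a :: b :: t.dropLast := by
        cases t with
        | nil => exact absurd rfl hne
        | cons c u => simp [List.dropLast]
      simp only [List.cons_append, pvChunkPairs_cons_cons, ih ht, h1, h2, List.append_assoc]
  | case2 t h2 =>
    match t, h2 with
    | [], _ => simp at h
    | [a], _ => by_cases ha : a = [] <;> simp [ha]
    | a :: b :: t, h2 => exact absurd rfl (h2 a b t)

def pvSim (s : List (List (List Int)) × List (List Int)) : PvAState :=
  { alpha := pvChunkPairs (s.1.tail ++ [s.2]),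
    faces := if s.1.length % 2 = 0 ∧ s.1 ≠ [] then (s.1.getLast?.getD []) ++ s.2 else s.2,
    flag := (s.1.length : Int),
    aliased := decide (s.1.length % 2 = 0 ∧ s.1 ≠ [] ∧ s.1.getLast?.getD [] ≠ []) }

theorem pvStep_comm (s : List (List (List Int)) × List (List Int)) (line : String) :
    pvAStep (pvSim s) line = pvSim (pvSegStep s line) := by
  obtain ⟨segs, cur⟩ := s
  by_cases hl : line = "+++++\n"
  · by_cases hk : segs.length % 2 = 0
    · -- delimiter, new flag odd
      cases segs with
      | nil => simp [pvAStep, pvSegStep, pvSim, hl]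
      | cons s0 rest =>
        have hro : rest.length % 2 = 1 := by simp at hk; omega
        have hA : ((rest.length : Int) + 1 + 1) % 2 = 1 := by omega
        have hB : ¬ ((rest.length + 1 + 1) % 2 = 0) := by omega
        have hE : pvChunkPairs (rest ++ [cur, []]) = pvChunkPairs (rest ++ [cur]) := by
          rw [show rest ++ [cur, []] = (rest ++ [cur]) ++ [[]] by simp,
            pvChunkPairs_concat_even (rest ++ [cur]) [] (by simp; omega)]
        simp [pvAStep, pvSegStep, pvSim, hl, hA, hB, hE]
    · -- delimiter, new flag even
      cases segs with
      | nil => simp at hk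
      | cons s0 rest =>
        have hre : rest.length % 2 = 0 := by simp at hk; omega
        have hA : ¬ ((rest.length : Int) + 1 + 1) % 2 = 1 := by omega
        have hB : ¬ ((rest.length + 1) % 2 = 0) := by omega
        have hC : (rest.length + 1 + 1) % 2 = 0 := by omega
        have hD : (s0 :: (rest ++ [cur])).getLast? = some cur := by
          rw [← List.cons_append]; exact List.getLast?_concat
        have hfe : pvChunkPairs (rest ++ [cur]) = pvChunkPairs rest :=
          pvChunkPairs_concat_even rest cur hre
        have hE : pvChunkPairs (rest ++ [cur, []]) =
            pvChunkPairs rest ++ (if cur ≠ [] then [cur] else []) := by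
          rw [show rest ++ [cur, []] = (rest ++ [cur]) ++ [[]] by simp,
            pvChunkPairs_concat_odd (rest ++ [cur]) [] (by simp; omega),
            List.dropLast_concat]
          simp
        by_cases hc : cur = []
        · subst hc
          simp [pvAStep, pvSegStep, pvSim, hl, hA, hB, hC, hD, hE, hfe]
        · simp [pvAStep, pvSegStep, pvSim, hl, hA, hB, hC, hD, hE, hfe, hc]
  · -- data line
    cases segs with
    | nil => simp [pvAStep, pvSegStep, pvSim, hl]
    | cons s0 rest =>
      by_cases hk : (s0 :: rest).length % 2 = 0
      · have hro : rest.length % 2 = 1 := by simp at hk; omega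
        have hne : rest ≠ [] := by intro h; rw [h] at hro; simp at hro
        have hB : (rest.length + 1) % 2 = 0 := by omega
        have hlastc : (s0 :: rest).getLast? = rest.getLast? := by
          cases rest with
          | nil => exact absurd rfl hne
          | cons c u => rw [List.getLast?_cons_cons]
        have hco1 := pvChunkPairs_concat_odd rest cur hro
        have hco2 := pvChunkPairs_concat_odd rest (cur ++ [pvParseFace line]) hro
        by_cases hg : rest.getLast?.getD [] = [] <;>
          simp [pvAStep, pvSegStep, pvSim, hl, hB, hlastc, hg, hco1, hco2,
            List.append_assoc]
      · have hre : rest.length % 2 = 0 := by simp at hk; omega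
        have hB : ¬ ((rest.length + 1) % 2 = 0) := by omega
        simp [pvAStep, pvSegStep, pvSim, hl, hB,
          pvChunkPairs_concat_even rest cur hre,
          pvChunkPairs_concat_even rest (cur ++ [pvParseFace line]) hre]

theorem pvFoldl_comm (ls : List String) (s : List (List (List Int)) × List (List Int)) :
    ls.foldl pvAStep (pvSim s) = pvSim (ls.foldl pvSegStep s) := by
  induction ls generalizing s with
  | nil => rfl
  | cons l t ih => simp only [List.foldl_cons, pvStep_comm, ih]

-- the parsed segment list of the input (proof-side view of Source B's loop)
def pvSegs (out : List String) : List (List (List Int)) :=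
  (out.splitOn "+++++\n").map (List.map pvParseFace)

theorem pvSegs_nil : pvSegs [] = [[]] := rfl

theorem pvMap_modifyHead {α β : Type} (f : α → β) (g : α → α) (g' : β → β)
    (h : ∀ a, f (g a) = g' (f a)) (l : List α) :
    (l.modifyHead g).map f = (l.map f).modifyHead g' := by
  cases l with
  | nil => rfl
  | cons a t => simp [List.modifyHead, h]

theorem pvSegs_cons_delim (t : List String) :
    pvSegs ("+++++\n" :: t) = [] :: pvSegs t := by
  simp [pvSegs, List.splitOn, List.splitOnP_cons]

theorem pvSegs_cons_data (l : String) (t : List String) (h : l ≠ "+++++\n") :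
    pvSegs (l :: t) = (pvSegs t).modifyHead (pvParseFace l :: ·) := by
  simp only [pvSegs, List.splitOn, List.splitOnP_cons]
  rw [if_neg (by simpa using h)]
  exact pvMap_modifyHead _ _ _ (fun a => by simp) _

theorem pvSegs_ne_nil (out : List String) : pvSegs out ≠ [] := by
  simp [pvSegs, List.splitOn, List.splitOnP_ne_nil]

theorem pvFoldl_segStep (out : List String) (segs : List (List (List Int)))
    (cur : List (List Int)) :
    (out.foldl pvSegStep (segs, cur)).1 ++ [(out.foldl pvSegStep (segs, cur)).2] =
      segs ++ (pvSegs out).modifyHead (cur ++ ·) := by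
  induction out generalizing segs cur with
  | nil => simp [pvSegs_nil, List.modifyHead]
  | cons l t ih =>
    by_cases hl : l = "+++++\n"
    · subst hl
      simp only [List.foldl_cons, pvSegStep, pvSegs_cons_delim, ih,
        List.modifyHead]
      cases pvSegs t <;> simp
    · have := pvSegs_cons_data l t hl
      simp only [List.foldl_cons, pvSegStep, if_neg hl, ih, this]
      obtain ⟨s, ss, hss⟩ : ∃ s ss, pvSegs t = s :: ss := by
        cases h : pvSegs t with
        | nil => exact absurd h (pvSegs_ne_nil t)
        | cons s ss => exact ⟨s, ss, rfl⟩
      simp [hss, List.modifyHead]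

theorem pvOddSel_add_two (l : List (List (List Int))) (i : Nat) :
    pvOddSel (i + 2) l = pvOddSel i l := by
  induction l generalizing i with
  | nil => rfl
  | cons a t ih =>
    have : (i + 2) % 2 = i % 2 := by omega
    simp [pvOddSel, this, show i + 2 + 1 = i + 1 + 2 from rfl, ih]

theorem pvOddSel_one_cons_cons (a b : List (List Int)) (t : List (List (List Int))) :
    pvOddSel 1 (a :: b :: t) = (if a ≠ [] then [a] else []) ++ pvOddSel 1 t := by
  simp [pvOddSel, pvOddSel_add_two]

-- key lemma: outside the aliasing condition, A's pair shape equals B's odd-segment selection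
theorem pvChunk_eq_odd (T : List (List (List Int)))
    (H : ∀ k, T.getD (2 * k) [] = [] ∨ T.getD (2 * k + 1) [] = []) :
    pvChunkPairs T = pvOddSel 1 T.dropLast := by
  induction T using pvChunkPairs.induct with
  | case1 a b t ih =>
    have h0 := H 0
    simp only [Nat.mul_zero, List.getD_cons_zero, List.getD_cons_succ] at h0
    have Ht : ∀ k, t.getD (2 * k) [] = [] ∨ t.getD (2 * k + 1) [] = [] := by
      intro k
      have := H (k + 1)
      simpa [show 2 * (k + 1) = 2 * k + 1 + 1 by ring, List.getD_cons_succ] using this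
    cases t with
    | nil =>
      by_cases ha : a = []
      · simp [ha, pvOddSel]
      · have hb : b = [] := h0.resolve_left ha
        simp [ha, hb, pvOddSel]
    | cons c u =>
      have hdl : (a :: b :: c :: u).dropLast = a :: b :: (c :: u).dropLast := by
        simp [List.dropLast]
      rw [pvChunkPairs_cons_cons, ih Ht, hdl, pvOddSel_one_cons_cons]
      rcases h0 with h0 | h0 <;> simp [h0]
  | case2 t h2 =>
    match t, h2 with
    | [], _ => rfl
    | [a], _ => simp [pvOddSel]
    | a :: b :: t, h2 => exact absurd rfl (h2 a b t)

-- inside the aliasing condition the two shapes always differ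
theorem pvChunk_ne_odd (T : List (List (List Int)))
    (H : ∃ k, T.getD (2 * k) [] ≠ [] ∧ T.getD (2 * k + 1) [] ≠ []) :
    pvChunkPairs T ≠ pvOddSel 1 T.dropLast := by
  induction T using pvChunkPairs.induct with
  | case1 a b t ih =>
    obtain ⟨k, hk1, hk2⟩ := H
    cases k with
    | zero =>
      simp only [Nat.mul_zero, List.getD_cons_zero, List.getD_cons_succ] at hk1 hk2
      have hab : a ++ b ≠ a := by
        intro h
        have : (a ++ b).length = a.length := by rw [h]
        simp at this
        exact hk2 this
      cases t with
      | nil => simp [hk1, pvOddSel]; exact fun h => hab (by simpa using h)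
      | cons c u =>
        have hdl : (a :: b :: c :: u).dropLast = a :: b :: (c :: u).dropLast := by
          simp [List.dropLast]
        rw [pvChunkPairs_cons_cons, hdl, pvOddSel_one_cons_cons, if_pos hk1, if_pos hk1]
        intro h
        exact hab (List.head_eq_of_cons_eq h)
    | succ k =>
      have Ht : ∃ k, t.getD (2 * k) [] ≠ [] ∧ t.getD (2 * k + 1) [] ≠ [] := by
        refine ⟨k, ?_, ?_⟩
        · have := hk1
          simpa [show 2 * (k + 1) = 2 * k + 1 + 1 by ring, List.getD_cons_succ] using this
        · have := hk2
          simpa [show 2 * (k + 1) + 1 = 2 * k + 1 + 1 + 1 by ring, List.getD_cons_succ]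
            using this
      have htne : t ≠ [] := by
        obtain ⟨k, hk, _⟩ := Ht
        intro h; rw [h] at hk; simp [List.getD] at hk
      obtain ⟨c, u, rfl⟩ : ∃ c u, t = c :: u := by
        cases t with
        | nil => exact absurd rfl htne
        | cons c u => exact ⟨c, u, rfl⟩
      have hdl : (a :: b :: c :: u).dropLast = a :: b :: (c :: u).dropLast := by
        simp [List.dropLast]
      rw [pvChunkPairs_cons_cons, hdl, pvOddSel_one_cons_cons]
      by_cases ha : a = []
      · simp only [ha, ne_eq, not_true_eq_false, if_false, List.nil_append]
        exact ih Ht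
      · simp only [if_pos ha, List.cons_append, List.nil_append]
        intro h
        exact ih Ht (List.tail_eq_of_cons_eq h)
  | case2 t h2 =>
    match t, h2 with
    | [], _ => obtain ⟨k, hk, _⟩ := H; simp [List.getD] at hk
    | [a], _ =>
      obtain ⟨k, hk1, hk2⟩ := H
      cases k with
      | zero => simp [List.getD] at hk2
      | succ k => simp [List.getD] at hk1
    | a :: b :: t, h2 => exact absurd rfl (h2 a b t)

theorem pvGetD_map_nil (S : List (List String)) (j : Nat) :
    ((S.map (List.map pvParseFace)).getD j [] = []) ↔ (S.getD j [] = []) := by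
  induction S generalizing j with
  | nil => simp [List.getD]
  | cons s t ih =>
    cases j with
    | zero => simp
    | succ j => simpa [List.getD_cons_succ] using ih j

-- bridge: D_ (stated on the raw splitOn segments) read on the parsed segments
theorem pvD_iff (out_ : List String) :
    D_input_out out_ ↔
      ∃ k, (pvSegs out_).getD (2 * k + 1) [] ≠ [] ∧ (pvSegs out_).getD (2 * k + 2) [] ≠ [] := by
  unfold D_input_out pvSegs
  constructor
  · rintro ⟨k, _, h1, h2⟩
    exact ⟨k, by rw [ne_eq, pvGetD_map_nil]; exact h1, by rw [ne_eq, pvGetD_map_nil]; exact h2⟩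
  · rintro ⟨k, h1, h2⟩
    rw [ne_eq, pvGetD_map_nil] at h1 h2
    refine ⟨k, ?_, h1, h2⟩
    by_contra hk
    rw [not_lt] at hk
    exact h1 (List.getD_eq_default _ _ (by omega))

-- both ports, written through the segment list pvSegs out_
theorem pvA_eq_chunk (out_ : List String) :
    input_out out_ = pvChunkPairs (pvSegs out_).tail := by
  unfold input_out
  have h0 : ({ alpha := [], faces := [], flag := 0, aliased := false } : PvAState)
      = pvSim ([], []) := by simp [pvSim]
  rw [h0, pvFoldl_comm]
  have hseg := pvFoldl_segStep out_ [] []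
  have hid : (pvSegs out_).modifyHead (fun s => [] ++ s) = pvSegs out_ := by
    cases pvSegs out_ <;> simp [List.modifyHead]
  rw [hid, List.nil_append] at hseg
  rcases hst : out_.foldl pvSegStep ([], []) with ⟨segs, cur⟩
  rw [hst] at hseg
  dsimp only at hseg
  cases segs with
  | nil =>
    simp [pvSim, ← hseg]
  | cons s0 rest =>
    rw [← hseg]
    simp [pvSim]

theorem pvB_eq_odd (out_ : List String) :
    input_out_alt out_ = pvOddSel 1 (pvSegs out_).tail.dropLast := by
  unfold input_out_alt
  have hseg := pvFoldl_segStep out_ [] []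
  have hid : (pvSegs out_).modifyHead (fun s => [] ++ s) = pvSegs out_ := by
    cases pvSegs out_ <;> simp [List.modifyHead]
  rw [hid, List.nil_append] at hseg
  rcases hst : out_.foldl pvSegStep ([], []) with ⟨segs, cur⟩
  rw [hst] at hseg
  dsimp only at hseg
  show pvOddSel 0 segs = _
  cases segs with
  | nil =>
    have h2 : (pvSegs out_).tail = [] := by rw [← hseg]; simp
    rw [h2]
    simp [pvOddSel]
  | cons s0 rest =>
    have h2 : (pvSegs out_).tail = rest ++ [cur] := by rw [← hseg]; simp
    rw [h2, List.dropLast_concat]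
    simp [pvOddSel]

theorem pvShift (out_ : List String) (j : Nat) :
    (pvSegs out_).getD (j + 1) [] = (pvSegs out_).tail.getD j [] := by
  cases h : pvSegs out_ with
  | nil => exact absurd h (pvSegs_ne_nil out_)
  | cons s t => simp

-- ===== VERDICT (by name: the statements are the Claim_ definitions above) =====
theorem input_out_spec : Claim_unchanged_input_out := by
  intro out_ _ _ hD
  rw [pvA_eq_chunk, pvB_eq_odd]
  apply pvChunk_eq_odd
  intro k
  by_contra h
  rw [not_or] at h
  exact hD ((pvD_iff out_).2 ⟨k, by rw [pvShift]; exact h.1, by rw [pvShift]; exact h.2⟩)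

theorem input_out_changed : Claim_changed_input_out := by
  unfold Claim_changed_input_out; decide

theorem input_out_tight : Claim_exact_input_out := by
  intro out_ _ _ hD
  rw [pvA_eq_chunk, pvB_eq_odd]
  apply pvChunk_ne_odd
  obtain ⟨k, h1, h2⟩ := (pvD_iff out_).1 hD
  exact ⟨k, by rw [← pvShift]; exact h1, by rw [← pvShift]; exact h2⟩
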